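-- pv_equiv track=rewrite | github.com/liushuang393/serverlessAIAgents | apps/faq_system/backend/security/appi_compliance.py | _determine_breach_severity
-- ===== SOURCE A (Python) =====
-- from enum import Enum
--
-- class PIIType(str, Enum):
--     """個人情報タイプ."""
--
--     # 特定個人情報（厳格管理）
--     MYNUMBER = "mynumber"  # マイナンバー（個人番号）
--
--     # 要配慮個人情報
--     HEALTH_INFO = "health_info"  # 健康情報
--     CRIMINAL_RECORD = "criminal_record"  # 犯罪歴
--     RACE_ETHNICITY = "race_ethnicity"  # 人種・民族
--     RELIGION = "religion"  # 宗教・信条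
--     UNION_MEMBERSHIP = "union_membership"  # 労働組合
--
--     # 一般個人情報
--     NAME = "name"  # 氏名
--     ADDRESS = "address"  # 住所
--     PHONE = "phone"  # 電話番号
--     EMAIL = "email"  # メールアドレス
--     BIRTHDAY = "birthday"  # 生年月日
--     PASSPORT = "passport"  # パスポート番号
--     DRIVER_LICENSE = "driver_license"  # 運転免許証番号
--     CREDIT_CARD = "credit_card"  # クレジットカード番号
--     BANK_ACCOUNT = "bank_account"  # 銀行口座
--
-- class PIISeverity(str, Enum):
--     """PII 深刻度."""
--
--     CRITICAL = "critical"  # 特定個人情報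
--     HIGH = "high"  # 要配慮個人情報
--     MEDIUM = "medium"  # 一般個人情報
--     LOW = "low"  # 軽微
--
-- def _determine_breach_severity(
--
--     pii_types: list[PIIType],
--     affected_count: int,
-- ) -> PIISeverity:
--     """漏洩深刻度を判定."""
--     # マイナンバー漏洩は常に CRITICAL
--     if PIIType.MYNUMBER in pii_types:
--         return PIISeverity.CRITICAL
--
--     # 要配慮個人情報は HIGH
--     sensitive_types = {
--         PIIType.HEALTH_INFO,
--         PIIType.CRIMINAL_RECORD,
--         PIIType.RACE_ETHNICITY,
--         PIIType.RELIGION,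
--     }
--     if any(t in sensitive_types for t in pii_types):
--         return PIISeverity.HIGH
--
--     # 大量漏洩は HIGH
--     if affected_count >= 1000:
--         return PIISeverity.HIGH
--
--     return PIISeverity.MEDIUM
-- ===== SOURCE B (Python) =====
-- _RANK = {
--     "mynumber": 2,        # PIIType.MYNUMBER -> CRITICAL
--     "health_info": 1,     # the four sensitive types -> HIGH
--     "criminal_record": 1,
--     "race_ethnicity": 1,
--     "religion": 1,        # every other type -> MEDIUM (rank 0)
-- }
-- _SEVERITY = ("medium", "high", "critical")
--
--
-- def _determine_breach_severity(pii_types, affected_count):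
--     """Table lookup + reduce: most-severe rank over types, joined with the count rank."""
--     type_rank = max((_RANK.get(t, 0) for t in pii_types), default=0)
--     count_rank = 1 if affected_count >= 1000 else 0
--     return _SEVERITY[max(type_rank, count_rank)]
-- ===== Notes on version B (the rewrite author's own statement) =====
-- stated objective: alternative
-- what changed: Replaced the sequential guard cascade by a severity-rank table (dict PIIType->0/1/2), a max-reduce over the types joined with a count-derived rank, and an indexed severity tuple.
import Mathlib
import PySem

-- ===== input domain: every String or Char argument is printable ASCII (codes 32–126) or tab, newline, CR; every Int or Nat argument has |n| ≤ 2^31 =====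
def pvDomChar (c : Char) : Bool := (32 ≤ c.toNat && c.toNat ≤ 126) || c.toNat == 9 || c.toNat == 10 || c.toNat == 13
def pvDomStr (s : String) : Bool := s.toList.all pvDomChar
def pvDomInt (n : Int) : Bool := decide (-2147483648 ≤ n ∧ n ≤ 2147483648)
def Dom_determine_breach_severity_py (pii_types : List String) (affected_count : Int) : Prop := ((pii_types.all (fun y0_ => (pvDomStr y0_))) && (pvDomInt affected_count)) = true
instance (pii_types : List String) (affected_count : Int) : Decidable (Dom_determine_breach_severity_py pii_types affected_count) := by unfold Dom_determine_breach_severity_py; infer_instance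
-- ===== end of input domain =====

-- B replaces A's guard cascade by a rank table + max-reduce (same cost, different decomposition).

-- ===== PORT A =====
-- the set literal `sensitive_types` of A
def pvSensitiveSet : PySem.Set String :=
  PySem.Set.ofList ["health_info", "criminal_record", "race_ethnicity", "religion"]

def determine_breach_severity_py (pii_types : List String) (affected_count : Int) : String :=
  if pii_types.contains "mynumber" then "critical"
  else if pii_types.any (fun t => pvSensitiveSet.contains t) then "high"
  else if affected_count ≥ 1000 then "high"
  else "medium"

-- ===== PORT B =====
-- the dict literal `_RANK` of Source B
def pvRankTbl : PySem.Dict String Int :=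
  PySem.Dict.ofList
    [("mynumber", 2), ("health_info", 1), ("criminal_record", 1),
     ("race_ethnicity", 1), ("religion", 1)]

-- the tuple literal `_SEVERITY` of Source B
def pvSeverityTbl : List String := ["medium", "high", "critical"]

def determine_breach_severity_py_alt (pii_types : List String) (affected_count : Int) : String :=
  -- max((_RANK.get(t, 0) for t in pii_types), default=0)
  let type_rank : Int := (pii_types.map (fun t => pvRankTbl.getD t 0)).foldl max 0
  let count_rank : Int := if affected_count ≥ 1000 then 1 else 0
  PySem.List.pyGetD pvSeverityTbl (max type_rank count_rank) ""

-- ===== PRECONDITION & SPEC =====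
def Spec_determine_breach_severity_py (pii_types : List String) (affected_count : Int) (out : String) : Prop := out = determine_breach_severity_py_alt pii_types affected_count
instance (pii_types : List String) (affected_count : Int) (out : String) : Decidable (Spec_determine_breach_severity_py pii_types affected_count out) := by unfold Spec_determine_breach_severity_py; infer_instance

-- ===== CLAIM (what is proved, stated in full; the proofs are below) =====
def Claim_equal_determine_breach_severity_py : Prop := ∀ (pii_types : List String) (affected_count : Int), Dom_determine_breach_severity_py pii_types affected_count → Spec_determine_breach_severity_py pii_types affected_count (determine_breach_severity_py pii_types affected_count)

-- ===== LEMMAS AND PROOFS =====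

-- per-element rank characterisation: the table encodes A's two guard classes
theorem pvRank_eq (t : String) :
    pvRankTbl.getD t 0 = if t = "mynumber" then 2 else if t ∈ pvSensitiveSet then 1 else 0 := by
  have hset : pvSensitiveSet = ["health_info", "criminal_record", "race_ethnicity", "religion"] := by
    decide
  simp [pvRankTbl, hset, PySem.Dict.ofList, PySem.Dict.update, PySem.Dict.getD_insert,
        PySem.Dict.getD_empty]
  split_ifs <;> simp_all

-- the max-fold computes A's cascaded rank
theorem pvFold_rank (l : List String) (a : Int) (h0 : 0 ≤ a) :
    (l.map (fun t => pvRankTbl.getD t 0)).foldl max a =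
      max a (if "mynumber" ∈ l then 2
             else if ∃ x ∈ l, x ∈ pvSensitiveSet then 1 else 0) := by
  induction l generalizing a with
  | nil => simp; omega
  | cons x xs ih =>
    simp only [List.map_cons, List.foldl_cons, List.mem_cons, pvRank_eq x]
    rw [ih (max a (if x = "mynumber" then 2 else if x ∈ pvSensitiveSet then 1 else 0))
        (by split_ifs <;> omega)]
    have hcons : (∃ y ∈ x :: xs, y ∈ pvSensitiveSet) ↔
        (x ∈ pvSensitiveSet ∨ ∃ y ∈ xs, y ∈ pvSensitiveSet) := by simp
    rw [if_congr hcons rfl rfl]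
    by_cases hx : x = "mynumber" <;>
      by_cases hs : x ∈ pvSensitiveSet <;>
      by_cases hm : "mynumber" ∈ xs <;>
      by_cases ha : ∃ y ∈ xs, y ∈ pvSensitiveSet <;>
      simp [hx, hs, hm, ha, eq_comm]

-- ===== VERDICT (by name: the statement is the Claim_ definition above) =====
theorem determine_breach_severity_py_spec : Claim_equal_determine_breach_severity_py := by
  intro l n _
  unfold Spec_determine_breach_severity_py determine_breach_severity_py determine_breach_severity_py_alt
  rw [pvFold_rank l 0 le_rfl]
  by_cases hm : "mynumber" ∈ l <;>
    by_cases ha : ∃ x ∈ l, x ∈ pvSensitiveSet <;>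
    by_cases hn : n ≥ 1000 <;>
    simp [hm, ha, hn, pvSeverityTbl, PySem.List.pyGetD, PySem.List.pyGet?, PySem.List.pyIdx?, PySem.Set.contains]
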